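-- pv_equiv track=rewrite | github.com/yeolsim2hajo/Team_hard | wonkyoung/programmers/level 2/2개_이하로_다른_비트.py | solution
-- ===== SOURCE A (Python) =====
-- def solution(numbers):
--     def find_number(number):
--         def convert_binary(number):
--             reversed_binary = []
--             if number == 0:
--                 return [0]
--             while number:
--                 reversed_binary.append(number%2)
--                 number //= 2
--             return reversed_binary
--         def convert_decimal(num_list):
--             decimal_number = 0
--             multiple = 1
--             for number in num_list:
--                 decimal_number += number*multiple
--                 multiple *= 2
--             return decimal_number
--
--         reversed_binary = convert_binary(number)
--         length = len(reversed_binary)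
--         for i in range(length):
--             if reversed_binary[i] == 0:
--                 reversed_binary[i] = 1
--                 if i >= 1:
--                     reversed_binary[i - 1] = 0
--                 return convert_decimal(reversed_binary)
--         reversed_binary[-1] = 0
--         reversed_binary.append(1)
--         return convert_decimal(reversed_binary)
--
--     answer = []
--     for number in numbers:
--         answer.append(find_number(number))
--
--     return answer
-- ===== SOURCE B (Python) =====
-- def solution(numbers):
--     # next number differing in at most 2 bits: set the lowest zero bit,
--     # clear the bit just below it (if any) -- pure integer bit arithmetic
--     def find_number(x):
--         bit = (~x) & (x + 1)          # lowest zero bit of x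
--         return x + bit - (bit >> 1)
--     return [find_number(x) for x in numbers]
-- ===== Notes on version B (the rewrite author's own statement) =====
-- stated objective: faster
-- what changed: Replaces the binary-list construction, index-scanning mutation loop and decimal reconstruction with a single closed bit-arithmetic expression per number: bit = (~x)&(x+1), answer = x + bit - (bit>>1).
import Mathlib
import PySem

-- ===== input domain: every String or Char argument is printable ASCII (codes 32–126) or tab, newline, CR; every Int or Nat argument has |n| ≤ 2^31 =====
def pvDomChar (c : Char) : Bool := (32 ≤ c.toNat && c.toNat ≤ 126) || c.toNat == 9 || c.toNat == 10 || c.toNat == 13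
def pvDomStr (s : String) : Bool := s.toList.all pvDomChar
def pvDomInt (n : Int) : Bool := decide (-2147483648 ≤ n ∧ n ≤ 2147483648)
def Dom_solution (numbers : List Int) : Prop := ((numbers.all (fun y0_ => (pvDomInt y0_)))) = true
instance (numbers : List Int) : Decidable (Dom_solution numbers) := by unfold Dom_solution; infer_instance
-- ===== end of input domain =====

-- B replaces A's binary-list build / scan / decimal rebuild by one closed bit-arithmetic
-- expression per number (bit = (~x)&(x+1); x + bit - (bit>>1)); equivalence on non-negative inputs.

-- ===== PORT A =====
-- helper convert_decimal: foldl carrying (decimal_number, multiple)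
def convertDecimal (l : List Int) : Int :=
  (l.foldl (fun (st : Int × Int) b => (st.1 + b * st.2, st.2 * 2)) (0, 1)).1

-- helper: the 'while number:' loop of convert_binary.  Exact for number ≥ 0;
-- for number < 0 Python's loop never terminates (excluded by Pre_solution).
def cbLoop (n : Int) : List Int :=
  if h : 0 < n then PySem.Int.mod n 2 :: cbLoop (PySem.Int.floordiv n 2) else []
termination_by n.toNat
decreasing_by
  have h2 : PySem.Int.floordiv n 2 = n / 2 := PySem.Int.floordiv_eq_ediv_of_pos (by omega)
  rw [h2]; omega

def convertBinary (number : Int) : List Int :=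
  if number = 0 then [0] else cbLoop number

-- the 'for i in range(length)' scan with its in-place mutation and early return
def findLoop (b : List Int) (i : Nat) : Option Int :=
  if h : i < b.length then
    if b.getD i 0 = 0 then
      some (convertDecimal (if 1 ≤ i then (b.set i 1).set (i - 1) 0 else b.set i 1))
    else findLoop b (i + 1)
  else none
termination_by b.length - i
decreasing_by omega

def findNumber (number : Int) : Int :=
  match findLoop (convertBinary number) 0 with
  | some v => v
  | none =>  -- rb[-1] = 0; append 1 (rb is nonempty)
      convertDecimal (((convertBinary number).set ((convertBinary number).length - 1) 0) ++ [1])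

def solution (numbers : List Int) : List Int :=
  numbers.foldl (fun acc x => acc ++ [findNumber x]) []

-- ===== PORT B =====
-- bit = (~x) & (x+1); x + bit - (bit >> 1)   (Int.not/Int.land/Int.shiftRight = Python ~, &, >>)
def solution_alt (numbers : List Int) : List Int :=
  numbers.map (fun x =>
    let bit := Int.land (Int.not x) (x + 1)
    x + bit - Int.shiftRight bit 1)

-- ===== PRECONDITION & SPEC =====
-- Pre_ excludes negative numbers: on any negative element A's 'while number:' loop diverges
-- (number //= 2 stabilises at -1), so A never returns there.
def Pre_solution (numbers : List Int) : Prop := ∀ x ∈ numbers, 0 ≤ x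
instance (numbers : List Int) : Decidable (Pre_solution numbers) := by
  unfold Pre_solution; infer_instance

def pvWitness_solution : List Int := [0, 1, 2, 3, 7, 12, 2147483647]

def Spec_solution (numbers : List Int) (out : List Int) : Prop := out = solution_alt numbers
instance (numbers : List Int) (out : List Int) : Decidable (Spec_solution numbers out) := by
  unfold Spec_solution; infer_instance

-- ===== CLAIM (what is proved, stated in full; the proofs are below) =====
def Claim_equal_solution : Prop :=
  ∀ (numbers : List Int), Dom_solution numbers → Pre_solution numbers →
    Spec_solution numbers (solution numbers)

-- ===== LEMMAS AND PROOFS =====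

-- simple recursive model of convert_decimal
def cdr : List Int → Int
  | [] => 0
  | b :: t => b + 2 * cdr t

-- lowest zero bit of n, and the value B computes, in ℕ
def bitN (n : Nat) : Nat := (n + 1).ldiff n
def gN (n : Nat) : Nat := n + bitN n - bitN n / 2

theorem cd_aux (l : List Int) : ∀ d m : Int,
    (l.foldl (fun (st : Int × Int) b => (st.1 + b * st.2, st.2 * 2)) (d, m)).1 = d + m * cdr l := by
  induction l with
  | nil => intro d m; simp [cdr]
  | cons b t ih => intro d m; simp [List.foldl, cdr, ih]; ring

theorem cd_eq (l : List Int) : convertDecimal l = cdr l := by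
  unfold convertDecimal; rw [cd_aux]; ring

theorem cbLoop_zero : cbLoop 0 = [] := by rw [cbLoop]; simp

theorem cbLoop_eq (n : Nat) (h : 0 < n) :
    cbLoop (n : Int) = ((n % 2 : Nat) : Int) :: cbLoop ((n / 2 : Nat) : Int) := by
  rw [cbLoop]
  have h1 : PySem.Int.mod (n : Int) 2 = ((n % 2 : Nat) : Int) := by
    exact_mod_cast PySem.Int.mod_natCast n 2
  have h2 : PySem.Int.floordiv (n : Int) 2 = ((n / 2 : Nat) : Int) := by
    exact_mod_cast PySem.Int.floordiv_natCast n 2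
  rw [dif_pos (by exact_mod_cast h), h1, h2]

theorem cdr_cb (n : Nat) : cdr (cbLoop (n : Int)) = (n : Int) := by
  induction n using Nat.strong_induction_on with
  | _ n ih =>
    rcases Nat.eq_zero_or_pos n with h0 | hp
    · subst h0; simp [cbLoop_zero, cdr]
    · rw [cbLoop_eq n hp]
      simp only [cdr]
      rw [ih (n / 2) (Nat.div_lt_self hp (by omega))]
      push_cast; omega

theorem fl_stop (b : List Int) (i : Nat) (h : i < b.length) (h0 : b.getD i 0 = 0) :
    findLoop b i = some (convertDecimal (if 1 ≤ i then (b.set i 1).set (i - 1) 0 else b.set i 1)) := by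
  rw [findLoop, dif_pos h, if_pos h0]

theorem fl_step (b : List Int) (i : Nat) (h : i < b.length) (h1 : b.getD i 0 ≠ 0) :
    findLoop b i = findLoop b (i + 1) := by
  rw [findLoop, dif_pos h, if_neg h1]

theorem fl_none (b : List Int) (i : Nat) (h : ¬ i < b.length) : findLoop b i = none := by
  rw [findLoop, dif_neg h]

-- scanning 1 :: t from position i+2 is scanning t from position i+1, result doubled plus one
theorem fl_shift (t : List Int) : ∀ i : Nat,
    findLoop (1 :: t) (i + 2) = (findLoop t (i + 1)).map (fun v => 2 * v + 1) := by
  suffices key : ∀ k i, t.length - i ≤ k →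
      findLoop (1 :: t) (i + 2) = (findLoop t (i + 1)).map (fun v => 2 * v + 1) by
    intro i; exact key t.length i (by omega)
  intro k
  induction k with
  | zero =>
    intro i hle
    rw [fl_none t (i + 1) (by simp; omega), fl_none (1 :: t) (i + 2) (by simp; omega)]
    rfl
  | succ k ih =>
    intro i hle
    by_cases hlt : i + 1 < t.length
    · have hlt' : i + 2 < (1 :: t).length := by simp; omega
      have hget : (1 :: t).getD (i + 2) 0 = t.getD (i + 1) 0 := rfl
      by_cases h0 : t.getD (i + 1) 0 = 0
      · rw [fl_stop _ _ hlt' (by rw [hget]; exact h0), fl_stop _ _ hlt h0,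
          if_pos (show 1 ≤ i + 2 by omega), if_pos (show 1 ≤ i + 1 by omega)]
        have e2 : i + 2 - 1 = i + 1 := by omega
        have e1 : i + 1 - 1 = i := by omega
        have hset : ((1 :: t).set (i + 2) 1).set (i + 1) 0
            = 1 :: ((t.set (i + 1) 1).set i 0) := by
          simp [List.set]
        rw [e2, e1, hset]
        simp only [Option.map_some, cd_eq, cdr]
        exact congrArg some (by ring)
      · rw [fl_step _ _ hlt' (by rw [hget]; exact h0), fl_step _ _ hlt h0]
        exact ih (i + 1) (by omega)
    · rw [fl_none t (i + 1) hlt, fl_none (1 :: t) (i + 2) (by simp at hlt ⊢; omega)]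
      rfl

theorem fn_zero : findNumber 0 = 1 := by
  have hcb : convertBinary 0 = [0] := by rw [convertBinary]; simp
  unfold findNumber
  rw [hcb, fl_stop [0] 0 (by simp) (by simp)]
  simp [cd_eq, cdr]

theorem fn_one : findNumber ((1 : Nat) : Int) = ((2 : Nat) : Int) := by
  have hcb : convertBinary ((1 : Nat) : Int) = [1] := by
    rw [convertBinary, if_neg (by norm_num)]
    rw [cbLoop_eq 1 (by omega)]
    norm_num [cbLoop_zero]
  unfold findNumber
  rw [hcb, fl_step _ 0 (by simp) (by simp), fl_none _ 1 (by simp)]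
  norm_num [cd_eq, cdr, List.set]

theorem fn_even (m : Nat) (hm : 0 < m) :
    findNumber ((2 * m : Nat) : Int) = ((2 * m + 1 : Nat) : Int) := by
  have hcb : convertBinary ((2 * m : Nat) : Int) = 0 :: cbLoop (m : Int) := by
    rw [convertBinary, if_neg (by push_cast; omega)]
    rw [cbLoop_eq (2 * m) (by omega), Nat.mul_mod_right,
      show 2 * m / 2 = m by omega]
    rfl
  unfold findNumber
  rw [hcb, fl_stop _ 0 (by simp) (by simp), if_neg (by omega : ¬ 1 ≤ 0)]
  simp only [List.set, cd_eq, cdr, cdr_cb]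
  push_cast; ring

theorem fn_odd_even (m : Nat) (hm : m % 2 = 0) (hp : 0 < m) :
    findNumber ((2 * m + 1 : Nat) : Int) = ((2 * m + 2 : Nat) : Int) := by
  obtain ⟨u, hu⟩ : ∃ u, cbLoop (m : Int) = 0 :: u := by
    refine ⟨cbLoop ((m / 2 : Nat) : Int), ?_⟩
    rw [cbLoop_eq m hp, hm]; rfl
  have hcb : convertBinary ((2 * m + 1 : Nat) : Int) = 1 :: 0 :: u := by
    rw [convertBinary, if_neg (by push_cast; omega)]
    rw [cbLoop_eq (2 * m + 1) (by omega),
      show (2 * m + 1) % 2 = 1 by omega, show (2 * m + 1) / 2 = m by omega, hu]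
    rfl
  have hm' : cdr (0 :: u) = (m : Int) := by rw [← hu, cdr_cb]
  simp only [cdr] at hm'
  unfold findNumber
  rw [hcb, fl_step _ 0 (by simp) (by simp), fl_stop _ 1 (by simp) (by simp [List.getD]),
    if_pos (by omega : 1 ≤ 1)]
  simp only [Nat.sub_self, List.set, cd_eq, cdr]
  push_cast
  omega

theorem fn_odd_odd (m : Nat) (hm : m % 2 = 1) :
    findNumber ((2 * m + 1 : Nat) : Int) = 2 * findNumber (m : Int) + 1 := by
  obtain ⟨u, hu⟩ : ∃ u, cbLoop (m : Int) = 1 :: u := by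
    refine ⟨cbLoop ((m / 2 : Nat) : Int), ?_⟩
    rw [cbLoop_eq m (by omega), hm]; rfl
  have hcbm : convertBinary (m : Int) = 1 :: u := by
    rw [convertBinary, if_neg (by push_cast; omega)]; exact hu
  have hcb : convertBinary ((2 * m + 1 : Nat) : Int) = 1 :: 1 :: u := by
    rw [convertBinary, if_neg (by push_cast; omega)]
    rw [cbLoop_eq (2 * m + 1) (by omega),
      show (2 * m + 1) % 2 = 1 by omega, show (2 * m + 1) / 2 = m by omega, hu]
    rfl
  have hshift : findLoop (1 :: 1 :: u) 0 = (findLoop (1 :: u) 0).map (fun v => 2 * v + 1) := by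
    rw [fl_step _ 0 (by simp) (by simp), fl_step _ 1 (by simp) (by simp [List.getD])]
    rw [show (1 : Nat) + 1 = 0 + 2 from rfl, fl_shift (1 :: u) 0]
    rw [fl_step (1 :: u) 0 (by simp) (by simp)]
  unfold findNumber
  rw [hcb, hcbm, hshift]
  cases h : findLoop (1 :: u) 0 with
  | some v => simp
  | none =>
    simp only [Option.map_none]
    rw [show (1 :: 1 :: u).length - 1 = u.length + 1 by simp,
      show (1 :: u).length - 1 = u.length by simp]
    have hset : (1 :: 1 :: u).set (u.length + 1) 0 = 1 :: ((1 :: u).set u.length 0) := by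
      simp [List.set]
    rw [hset, show (1 :: ((1 :: u).set u.length 0)) ++ [1]
        = 1 :: (((1 :: u).set u.length 0) ++ [1]) from rfl]
    simp only [cd_eq, cdr]
    ring

-- bit lemmas in ℕ
theorem bitN_even (n : Nat) (h : n % 2 = 0) : bitN n = 1 := by
  unfold bitN
  apply Nat.eq_of_testBit_eq
  intro i
  cases i with
  | zero =>
    rw [Nat.testBit_ldiff]
    have h1 : (n + 1) % 2 = 1 := by omega
    simp [Nat.testBit_zero, h, h1]
  | succ i =>
    rw [Nat.testBit_ldiff, Nat.testBit_succ, Nat.testBit_succ,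
      show (n + 1) / 2 = n / 2 by omega]
    simp [Nat.testBit_succ]

theorem bitN_odd (m : Nat) : bitN (2 * m + 1) = 2 * bitN m := by
  unfold bitN
  apply Nat.eq_of_testBit_eq
  intro i
  cases i with
  | zero =>
    rw [Nat.testBit_ldiff]
    have h1 : (2 * m + 1 + 1) % 2 = 0 := by omega
    have h2 : (2 * ((m + 1).ldiff m)) % 2 = 0 := by omega
    simp [Nat.testBit_zero, h1, h2]
  | succ i =>
    have h3 : (2 * ((m + 1).ldiff m)).testBit (i + 1) = ((m + 1).ldiff m).testBit i := by
      rw [Nat.testBit_succ]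
      congr 1
      omega
    rw [Nat.testBit_ldiff, Nat.testBit_succ, Nat.testBit_succ, h3, Nat.testBit_ldiff,
      show (2 * m + 1 + 1) / 2 = m + 1 by omega, show (2 * m + 1) / 2 = m by omega]

theorem bitN_odd_even (m : Nat) (hm : m % 2 = 1) : bitN m % 2 = 0 := by
  have h : m = 2 * (m / 2) + 1 := by omega
  rw [h, bitN_odd]; omega

theorem gN_zero : gN 0 = 1 := by
  unfold gN; rw [bitN_even 0 rfl]

theorem gN_one : gN 1 = 2 := by
  unfold gN
  rw [show (1 : Nat) = 2 * 0 + 1 from rfl, bitN_odd, bitN_even 0 rfl]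

-- the induction: A's findNumber equals B's closed form, in ℕ
theorem find_g (n : Nat) : findNumber (n : Int) = (gN n : Int) := by
  induction n using Nat.strong_induction_on with
  | _ n ih =>
    rcases Nat.even_or_odd n with he | ho
    · rcases Nat.eq_zero_or_pos n with h0 | hp
      · subst h0
        rw [show ((0 : Nat) : Int) = 0 from rfl, fn_zero, gN_zero]; rfl
      · obtain ⟨m, hm⟩ := he
        rw [show n = 2 * m by omega, fn_even m (by omega)]
        have hg : gN (2 * m) = 2 * m + 1 := by
          unfold gN
          rw [bitN_even (2 * m) (by omega)]
          omega
        rw [hg]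
    · obtain ⟨m, hm⟩ := ho
      subst hm
      rcases Nat.even_or_odd m with hme | hmo
      · rcases Nat.eq_zero_or_pos m with h0 | hp
        · subst h0
          rw [show 2 * 0 + 1 = 1 from rfl, fn_one, gN_one]
        · have hmod : m % 2 = 0 := by obtain ⟨c, hc⟩ := hme; omega
          rw [fn_odd_even m hmod hp]
          have hg : gN (2 * m + 1) = 2 * m + 2 := by
            unfold gN
            rw [bitN_odd m, bitN_even m hmod]
            omega
          rw [hg]
      · have hmod : m % 2 = 1 := by obtain ⟨c, hc⟩ := hmo; omega
        rw [fn_odd_odd m hmod, ih m (by omega)]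
        have hbe : bitN m % 2 = 0 := bitN_odd_even m hmod
        have hg : gN (2 * m + 1) = 2 * gN m + 1 := by
          unfold gN
          rw [bitN_odd m]
          have hle : bitN m / 2 ≤ bitN m := Nat.div_le_self _ _
          omega
        rw [hg]; push_cast; ring

-- B's expression on a non-negative integer, reduced to gN
theorem alt_elem (n : Nat) :
    (n : Int) + Int.land (Int.not (n : Int)) ((n : Int) + 1)
      - Int.shiftRight (Int.land (Int.not (n : Int)) ((n : Int) + 1)) 1 = (gN n : Int) := by
  have h1 : Int.land (Int.not (n : Int)) ((n : Int) + 1) = ((bitN n : Nat) : Int) := by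
    show Int.land (Int.not (Int.ofNat n)) (Int.ofNat n + 1) = Int.ofNat (Nat.ldiff (n + 1) n)
    rfl
  rw [h1]
  have h2 : Int.shiftRight ((bitN n : Nat) : Int) 1 = ((bitN n / 2 : Nat) : Int) := by
    show Int.shiftRight (Int.ofNat (bitN n)) 1 = Int.ofNat (bitN n / 2)
    rw [show Int.shiftRight (Int.ofNat (bitN n)) 1 = Int.ofNat (bitN n >>> 1) from rfl,
      Nat.shiftRight_one]
  rw [h2]
  unfold gN
  have hle : bitN n / 2 ≤ bitN n := Nat.div_le_self _ _
  push_cast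
  omega

theorem find_g_int (x : Int) (hx : 0 ≤ x) :
    findNumber x = x + Int.land (Int.not x) (x + 1)
      - Int.shiftRight (Int.land (Int.not x) (x + 1)) 1 := by
  obtain ⟨n, rfl⟩ := Int.eq_ofNat_of_zero_le hx
  rw [find_g n]
  exact (alt_elem n).symm

theorem foldl_append_map (l : List Int) : ∀ acc : List Int,
    l.foldl (fun acc x => acc ++ [findNumber x]) acc = acc ++ l.map findNumber := by
  induction l with
  | nil => intro acc; simp
  | cons x t ih => intro acc; simp [List.foldl, ih]

-- ===== VERDICT (by name: the statement is the Claim_ definition above) =====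
theorem solution_spec : Claim_equal_solution := by
  intro numbers _hdom hpre
  unfold Spec_solution solution solution_alt
  rw [foldl_append_map]
  simp only [List.nil_append]
  apply List.map_congr_left
  intro x hx
  exact find_g_int x (hpre x hx)
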